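-- pv_equiv track=rewrite | github.com/Backpulver/Introduction-to-Python | homework2/telefonnaLubov.py | nums_to_text
-- ===== SOURCE A (Python) =====
-- def nums_to_text(nums):
--     nums.append(1)
--     msg = ""
--     count = 0
--     previous = None
--
--     for elem in nums:
--         if previous == elem or previous == None:
--             count += 1
--         else:
--             if previous != -1:
--                 mod3 = count % 3
--                 mod4 = count % 4
--
--                 match previous:
--                     case 2:
--                         match mod3:
--                             case 1: msg += "a"
--                             case 2: msg += "b"
--                             case 0: msg += "c"
--                     case 3:
--                         match mod3:
--                             case 1: msg += "d"
--                             case 2: msg += "e"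
--                             case 0: msg += "f"
--                     case 4:
--                         match mod3:
--                             case 1: msg += "g"
--                             case 2: msg += "h"
--                             case 0: msg += "i"
--                     case 5:
--                         match mod3:
--                             case 1: msg += "j"
--                             case 2: msg += "k"
--                             case 0: msg += "l"
--                     case 6:
--                         match mod3:
--                             case 1: msg += "m"
--                             case 2: msg += "n"
--                             case 0: msg += "o"
--                     case 7:
--                         match mod4:
--                             case 1: msg += "p"
--                             case 2: msg += "q"
--                             case 3: msg += "r"
--                             case 0: msg += "s"
--                     case 8:
--                         match mod3:
--                             case 1: msg += "t"
--                             case 2: msg += "u"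
--                             case 0: msg += "v"
--                     case 9:
--                         match mod4:
--                             case 1: msg += "w"
--                             case 2: msg += "x"
--                             case 3: msg += "y"
--                             case 0: msg += "z"
--                     case 0:
--                         msg += " "
--             #     count = 1
--             # else:
--             count = 1
--         previous = elem
--     return msg
-- ===== SOURCE B (Python) =====
-- _TABLE = {2: "abc", 3: "def", 4: "ghi", 5: "jkl", 6: "mno", 7: "pqrs", 8: "tuv", 9: "wxyz", 0: " "}
--
--
-- def nums_to_text(nums):
--     nums.append(1)  # same sentinel/mutation as the original
--     out = []
--     prev = None
--     for elem in nums: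
--         letters = _TABLE.get(elem)
--         if letters is not None:
--             if prev == elem:
--                 # another tap on the same key: cycle the pending letter forward
--                 out[-1] = letters[(letters.index(out[-1]) + 1) % len(letters)]
--             else:
--                 out.append(letters[0])
--         prev = elem
--     return "".join(out)
-- ===== Notes on version B (the rewrite author's own statement) =====
-- stated objective: alternative
-- what changed: Drops A's previous/count run-length state machine with its 50-line nested match entirely: B never counts a run length; it simulates multi-tap typing online, appending a key's first letter on a key change and cycling the output's last letter forward (via letters.index) on a repeated tap of the same key.
import Mathlib
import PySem

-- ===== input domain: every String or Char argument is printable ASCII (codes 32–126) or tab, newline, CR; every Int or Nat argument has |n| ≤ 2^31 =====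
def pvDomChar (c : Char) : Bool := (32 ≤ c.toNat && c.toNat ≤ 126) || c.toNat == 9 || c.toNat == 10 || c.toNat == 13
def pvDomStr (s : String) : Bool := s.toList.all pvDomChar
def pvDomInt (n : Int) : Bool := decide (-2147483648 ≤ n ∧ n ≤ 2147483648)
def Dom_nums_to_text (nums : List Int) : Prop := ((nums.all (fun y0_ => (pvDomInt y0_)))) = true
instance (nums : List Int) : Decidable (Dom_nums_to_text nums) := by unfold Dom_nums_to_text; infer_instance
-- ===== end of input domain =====

-- B drops A's previous/count run-length state machine (giant nested match): it simulates
-- multi-tap typing online — a key change appends the key's first letter, a repeated tap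
-- cycles the output's last letter forward via letters.index; no run length is counted.
-- Same cost, same return value; both A and B append the sentinel 1 to the caller's list (mutation).


-- ===== PORT A =====
-- the body of A's for-loop, on the state (msg, count, previous)
def pvStepA (st : String × Int × Option Int) (elem : Int) : String × Int × Option Int :=
  let (msg, count, previous) := st
  if previous = some elem ∨ previous = none then
    (msg, count + 1, some elem)
  else
    let msg :=
      if previous ≠ some (-1) then
        let mod3 := PySem.Int.mod count 3
        let mod4 := PySem.Int.mod count 4
        if previous = some 2 then
          (if mod3 = 1 then msg ++ "a" else if mod3 = 2 then msg ++ "b" else if mod3 = 0 then msg ++ "c" else msg)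
        else if previous = some 3 then
          (if mod3 = 1 then msg ++ "d" else if mod3 = 2 then msg ++ "e" else if mod3 = 0 then msg ++ "f" else msg)
        else if previous = some 4 then
          (if mod3 = 1 then msg ++ "g" else if mod3 = 2 then msg ++ "h" else if mod3 = 0 then msg ++ "i" else msg)
        else if previous = some 5 then
          (if mod3 = 1 then msg ++ "j" else if mod3 = 2 then msg ++ "k" else if mod3 = 0 then msg ++ "l" else msg)
        else if previous = some 6 then
          (if mod3 = 1 then msg ++ "m" else if mod3 = 2 then msg ++ "n" else if mod3 = 0 then msg ++ "o" else msg)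
        else if previous = some 7 then
          (if mod4 = 1 then msg ++ "p" else if mod4 = 2 then msg ++ "q" else if mod4 = 3 then msg ++ "r" else if mod4 = 0 then msg ++ "s" else msg)
        else if previous = some 8 then
          (if mod3 = 1 then msg ++ "t" else if mod3 = 2 then msg ++ "u" else if mod3 = 0 then msg ++ "v" else msg)
        else if previous = some 9 then
          (if mod4 = 1 then msg ++ "w" else if mod4 = 2 then msg ++ "x" else if mod4 = 3 then msg ++ "y" else if mod4 = 0 then msg ++ "z" else msg)
        else if previous = some 0 then
          msg ++ " "
        else msg
      else msg
    (msg, 1, some elem)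

def nums_to_text (nums : List Int) : String :=
  let nums := nums ++ [1]          -- nums.append(1)
  ((nums.foldl pvStepA ("", 0, none))).1

-- ===== PORT B =====
def pvTable : PySem.Dict Int String :=
  PySem.Dict.ofList [(2, "abc"), (3, "def"), (4, "ghi"), (5, "jkl"), (6, "mno"),
                     (7, "pqrs"), (8, "tuv"), (9, "wxyz"), (0, " ")]

-- the body of B's for-loop, on the state (out, prev); out holds the single characters
-- 'out' collects in Python, so ''.join(out) is String.ofList at the end
def pvStepB (st : List Char × Option Int) (elem : Int) : List Char × Option Int :=
  let (out, prev) := st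
  match pvTable.get? elem with
  | some letters =>
      if prev = some elem then
        -- out[-1], letters.index(out[-1]): never default (out ends with a letter of this run)
        let lastc := (PySem.List.pyGet? out (-1)).getD '?'
        let idx := (PySem.List.index? letters.toList lastc).getD 0
        let newc := (PySem.Str.pyGet? letters (PySem.Int.mod ((idx : Int) + 1) (PySem.Str.len letters))).getD '?'
        (out.dropLast ++ [newc], some elem)
      else
        (out ++ [(PySem.Str.pyGet? letters 0).getD '?'], some elem)
  | none => (out, some elem)

def nums_to_text_alt (nums : List Int) : String :=
  let nums := nums ++ [1]          -- nums.append(1)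
  String.ofList ((nums.foldl pvStepB ([], none)).1)

-- ===== PRECONDITION & SPEC =====
def Spec_nums_to_text (nums : List Int) (out : String) : Prop := out = nums_to_text_alt nums
instance (nums : List Int) (out : String) : Decidable (Spec_nums_to_text nums out) := by unfold Spec_nums_to_text; infer_instance

-- ===== CLAIM (what is proved, stated in full; the proofs are below) =====
def Claim_equal_nums_to_text : Prop := ∀ (nums : List Int), Dom_nums_to_text nums → Spec_nums_to_text nums (nums_to_text nums)

-- ===== LEMMAS AND PROOFS =====

-- the pending letter for a run of key p of current length c, as B keeps it at the end of out
def emitB (p : Int) (c : Nat) : String :=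
  match pvTable.get? p with
  | some letters =>
      String.ofList [(PySem.Str.pyGet? letters
        (PySem.Int.mod ((c : Int) - 1) (PySem.Str.len letters))).getD '?']
  | none => ""

-- A's emission, verbatim from pvStepA's else-branch: the piece appended to msg
def emitA (p : Int) (count : Int) : String :=
  if p ≠ -1 then
    let mod3 := PySem.Int.mod count 3
    let mod4 := PySem.Int.mod count 4
    if p = 2 then (if mod3 = 1 then "a" else if mod3 = 2 then "b" else if mod3 = 0 then "c" else "")
    else if p = 3 then (if mod3 = 1 then "d" else if mod3 = 2 then "e" else if mod3 = 0 then "f" else "")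
    else if p = 4 then (if mod3 = 1 then "g" else if mod3 = 2 then "h" else if mod3 = 0 then "i" else "")
    else if p = 5 then (if mod3 = 1 then "j" else if mod3 = 2 then "k" else if mod3 = 0 then "l" else "")
    else if p = 6 then (if mod3 = 1 then "m" else if mod3 = 2 then "n" else if mod3 = 0 then "o" else "")
    else if p = 7 then (if mod4 = 1 then "p" else if mod4 = 2 then "q" else if mod4 = 3 then "r" else if mod4 = 0 then "s" else "")
    else if p = 8 then (if mod3 = 1 then "t" else if mod3 = 2 then "u" else if mod3 = 0 then "v" else "")
    else if p = 9 then (if mod4 = 1 then "w" else if mod4 = 2 then "x" else if mod4 = 3 then "y" else if mod4 = 0 then "z" else "")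
    else if p = 0 then " "
    else ""
  else ""

-- the run-structured reference decoder both ports are reduced to
def pvG (p : Int) (c : Nat) : List Int → String
  | [] => emitB p c
  | x :: xs => if x = p then pvG p (c + 1) xs else emitB p c ++ pvG x 1 xs

def pvGstart : List Int → String
  | [] => ""
  | x :: xs => pvG x 1 xs

theorem pvT1 : pvTable.get? 1 = none := by decide

theorem pvTmk : pvTable = PySem.Dict.mk [(2, "abc"), (3, "def"), (4, "ghi"), (5, "jkl"),
    (6, "mno"), (7, "pqrs"), (8, "tuv"), (9, "wxyz"), (0, " ")] := by decide

theorem pvT_none (p : Int) (h0 : ¬ p = 0) (h2 : ¬ p = 2) (h3 : ¬ p = 3) (h4 : ¬ p = 4)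
    (h5 : ¬ p = 5) (h6 : ¬ p = 6) (h7 : ¬ p = 7) (h8 : ¬ p = 8) (h9 : ¬ p = 9) :
    pvTable.get? p = none := by
  rw [pvTmk]
  simp only [PySem.Dict.get?_mk_cons, beq_iff_eq]
  split_ifs <;> simp_all [PySem.Dict.get?]

set_option maxHeartbeats 2000000 in
theorem stepA_ne (msg : String) (count : Int) (p x : Int) (h : ¬ p = x) :
    pvStepA (msg, count, some p) x = (msg ++ emitA p count, 1, some x) := by
  have hco : ¬ (some p = some x ∨ (some p : Option Int) = none) := by simp [h]
  simp only [pvStepA, if_neg hco]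
  refine congrArg (fun m => (m, (1 : Int), some x)) ?_
  simp only [emitA, ne_eq, Option.some.injEq]
  by_cases h1 : p = -1
  · simp [h1]
  by_cases hq2 : p = 2
  · subst hq2
    norm_num
    split_ifs <;> simp
  by_cases hq3 : p = 3
  · subst hq3
    norm_num
    split_ifs <;> simp
  by_cases hq4 : p = 4
  · subst hq4
    norm_num
    split_ifs <;> simp
  by_cases hq5 : p = 5
  · subst hq5
    norm_num
    split_ifs <;> simp
  by_cases hq6 : p = 6
  · subst hq6
    norm_num
    split_ifs <;> simp
  by_cases hq7 : p = 7
  · subst hq7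
    norm_num
    split_ifs <;> simp
  by_cases hq8 : p = 8
  · subst hq8
    norm_num
    split_ifs <;> simp
  by_cases hq9 : p = 9
  · subst hq9
    norm_num
    split_ifs <;> simp
  by_cases hq0 : p = 0
  · subst hq0
    norm_num
  · simp [h1, hq2, hq3, hq4, hq5, hq6, hq7, hq8, hq9, hq0]

theorem emitB_one (c : Nat) : emitB 1 c = "" := by
  simp [emitB, pvT1]

theorem pvG_append_one (l : List Int) (p : Int) (c : Nat) :
    pvG p c (l ++ [1]) = pvG p c l := by
  induction l generalizing p c with
  | nil =>
      by_cases hp : (1 : Int) = p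
      · subst hp; simp [pvG, emitB_one]
      · simp [pvG, hp, emitB_one]
  | cons x xs ih =>
      by_cases hx : x = p <;> simp [pvG, hx, ih]

theorem pvT0 : pvTable.get? 0 = some " " := by decide
theorem pvT2 : pvTable.get? 2 = some "abc" := by decide
theorem pvT3 : pvTable.get? 3 = some "def" := by decide
theorem pvT4 : pvTable.get? 4 = some "ghi" := by decide
theorem pvT5 : pvTable.get? 5 = some "jkl" := by decide
theorem pvT6 : pvTable.get? 6 = some "mno" := by decide
theorem pvT7 : pvTable.get? 7 = some "pqrs" := by decide
theorem pvT8 : pvTable.get? 8 = some "tuv" := by decide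
theorem pvT9 : pvTable.get? 9 = some "wxyz" := by decide

theorem emitA_eq_emitB (p : Int) (c : Nat) (hc : 1 ≤ c) :
    emitA p ((c : Nat) : Int) = emitB p c := by
  have e3 : c % 3 = 0 ∨ c % 3 = 1 ∨ c % 3 = 2 := by omega
  have e4 : c % 4 = 0 ∨ c % 4 = 1 ∨ c % 4 = 2 ∨ c % 4 = 3 := by omega

  by_cases hp2 : p = 2
  · subst hp2
    rcases e3 with h | h | h
    · have hM : PySem.Int.mod (((c : Nat) : Int) - 1) (PySem.Str.len "abc") = 2 := by
        rw [show PySem.Str.len "abc" = ((3 : Nat) : Int) from rfl,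
            show ((c : Nat) : Int) - 1 = ((c - 1 : Nat) : Int) from by omega,
            PySem.Int.mod_natCast]
        omega
      have hE : emitB 2 c = "c" := by
        simp only [emitB, pvT2]
        rw [hM]
        decide
      have hI : ((c : Nat) : Int) % 3 = 0 := by omega
      have hD : (3 : Int) ∣ ((c : Nat) : Int) := by rw [Int.dvd_iff_emod_eq_zero]; omega
      rw [hE]
      norm_num [emitA, hI, hD]
    · have hM : PySem.Int.mod (((c : Nat) : Int) - 1) (PySem.Str.len "abc") = 0 := by
        rw [show PySem.Str.len "abc" = ((3 : Nat) : Int) from rfl,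
            show ((c : Nat) : Int) - 1 = ((c - 1 : Nat) : Int) from by omega,
            PySem.Int.mod_natCast]
        omega
      have hE : emitB 2 c = "a" := by
        simp only [emitB, pvT2]
        rw [hM]
        decide
      have hI : ((c : Nat) : Int) % 3 = 1 := by omega
      have hD : ¬ (3 : Int) ∣ ((c : Nat) : Int) := by rw [Int.dvd_iff_emod_eq_zero]; omega
      rw [hE]
      norm_num [emitA, hI, hD]
    · have hM : PySem.Int.mod (((c : Nat) : Int) - 1) (PySem.Str.len "abc") = 1 := by
        rw [show PySem.Str.len "abc" = ((3 : Nat) : Int) from rfl,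
            show ((c : Nat) : Int) - 1 = ((c - 1 : Nat) : Int) from by omega,
            PySem.Int.mod_natCast]
        omega
      have hE : emitB 2 c = "b" := by
        simp only [emitB, pvT2]
        rw [hM]
        decide
      have hI : ((c : Nat) : Int) % 3 = 2 := by omega
      have hD : ¬ (3 : Int) ∣ ((c : Nat) : Int) := by rw [Int.dvd_iff_emod_eq_zero]; omega
      rw [hE]
      norm_num [emitA, hI, hD]
  by_cases hp3 : p = 3
  · subst hp3
    rcases e3 with h | h | h
    · have hM : PySem.Int.mod (((c : Nat) : Int) - 1) (PySem.Str.len "def") = 2 := by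
        rw [show PySem.Str.len "def" = ((3 : Nat) : Int) from rfl,
            show ((c : Nat) : Int) - 1 = ((c - 1 : Nat) : Int) from by omega,
            PySem.Int.mod_natCast]
        omega
      have hE : emitB 3 c = "f" := by
        simp only [emitB, pvT3]
        rw [hM]
        decide
      have hI : ((c : Nat) : Int) % 3 = 0 := by omega
      have hD : (3 : Int) ∣ ((c : Nat) : Int) := by rw [Int.dvd_iff_emod_eq_zero]; omega
      rw [hE]
      norm_num [emitA, hI, hD]
    · have hM : PySem.Int.mod (((c : Nat) : Int) - 1) (PySem.Str.len "def") = 0 := by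
        rw [show PySem.Str.len "def" = ((3 : Nat) : Int) from rfl,
            show ((c : Nat) : Int) - 1 = ((c - 1 : Nat) : Int) from by omega,
            PySem.Int.mod_natCast]
        omega
      have hE : emitB 3 c = "d" := by
        simp only [emitB, pvT3]
        rw [hM]
        decide
      have hI : ((c : Nat) : Int) % 3 = 1 := by omega
      have hD : ¬ (3 : Int) ∣ ((c : Nat) : Int) := by rw [Int.dvd_iff_emod_eq_zero]; omega
      rw [hE]
      norm_num [emitA, hI, hD]
    · have hM : PySem.Int.mod (((c : Nat) : Int) - 1) (PySem.Str.len "def") = 1 := by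
        rw [show PySem.Str.len "def" = ((3 : Nat) : Int) from rfl,
            show ((c : Nat) : Int) - 1 = ((c - 1 : Nat) : Int) from by omega,
            PySem.Int.mod_natCast]
        omega
      have hE : emitB 3 c = "e" := by
        simp only [emitB, pvT3]
        rw [hM]
        decide
      have hI : ((c : Nat) : Int) % 3 = 2 := by omega
      have hD : ¬ (3 : Int) ∣ ((c : Nat) : Int) := by rw [Int.dvd_iff_emod_eq_zero]; omega
      rw [hE]
      norm_num [emitA, hI, hD]
  by_cases hp4 : p = 4
  · subst hp4
    rcases e3 with h | h | h
    · have hM : PySem.Int.mod (((c : Nat) : Int) - 1) (PySem.Str.len "ghi") = 2 := by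
        rw [show PySem.Str.len "ghi" = ((3 : Nat) : Int) from rfl,
            show ((c : Nat) : Int) - 1 = ((c - 1 : Nat) : Int) from by omega,
            PySem.Int.mod_natCast]
        omega
      have hE : emitB 4 c = "i" := by
        simp only [emitB, pvT4]
        rw [hM]
        decide
      have hI : ((c : Nat) : Int) % 3 = 0 := by omega
      have hD : (3 : Int) ∣ ((c : Nat) : Int) := by rw [Int.dvd_iff_emod_eq_zero]; omega
      rw [hE]
      norm_num [emitA, hI, hD]
    · have hM : PySem.Int.mod (((c : Nat) : Int) - 1) (PySem.Str.len "ghi") = 0 := by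
        rw [show PySem.Str.len "ghi" = ((3 : Nat) : Int) from rfl,
            show ((c : Nat) : Int) - 1 = ((c - 1 : Nat) : Int) from by omega,
            PySem.Int.mod_natCast]
        omega
      have hE : emitB 4 c = "g" := by
        simp only [emitB, pvT4]
        rw [hM]
        decide
      have hI : ((c : Nat) : Int) % 3 = 1 := by omega
      have hD : ¬ (3 : Int) ∣ ((c : Nat) : Int) := by rw [Int.dvd_iff_emod_eq_zero]; omega
      rw [hE]
      norm_num [emitA, hI, hD]
    · have hM : PySem.Int.mod (((c : Nat) : Int) - 1) (PySem.Str.len "ghi") = 1 := by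
        rw [show PySem.Str.len "ghi" = ((3 : Nat) : Int) from rfl,
            show ((c : Nat) : Int) - 1 = ((c - 1 : Nat) : Int) from by omega,
            PySem.Int.mod_natCast]
        omega
      have hE : emitB 4 c = "h" := by
        simp only [emitB, pvT4]
        rw [hM]
        decide
      have hI : ((c : Nat) : Int) % 3 = 2 := by omega
      have hD : ¬ (3 : Int) ∣ ((c : Nat) : Int) := by rw [Int.dvd_iff_emod_eq_zero]; omega
      rw [hE]
      norm_num [emitA, hI, hD]
  by_cases hp5 : p = 5
  · subst hp5
    rcases e3 with h | h | h
    · have hM : PySem.Int.mod (((c : Nat) : Int) - 1) (PySem.Str.len "jkl") = 2 := by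
        rw [show PySem.Str.len "jkl" = ((3 : Nat) : Int) from rfl,
            show ((c : Nat) : Int) - 1 = ((c - 1 : Nat) : Int) from by omega,
            PySem.Int.mod_natCast]
        omega
      have hE : emitB 5 c = "l" := by
        simp only [emitB, pvT5]
        rw [hM]
        decide
      have hI : ((c : Nat) : Int) % 3 = 0 := by omega
      have hD : (3 : Int) ∣ ((c : Nat) : Int) := by rw [Int.dvd_iff_emod_eq_zero]; omega
      rw [hE]
      norm_num [emitA, hI, hD]
    · have hM : PySem.Int.mod (((c : Nat) : Int) - 1) (PySem.Str.len "jkl") = 0 := by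
        rw [show PySem.Str.len "jkl" = ((3 : Nat) : Int) from rfl,
            show ((c : Nat) : Int) - 1 = ((c - 1 : Nat) : Int) from by omega,
            PySem.Int.mod_natCast]
        omega
      have hE : emitB 5 c = "j" := by
        simp only [emitB, pvT5]
        rw [hM]
        decide
      have hI : ((c : Nat) : Int) % 3 = 1 := by omega
      have hD : ¬ (3 : Int) ∣ ((c : Nat) : Int) := by rw [Int.dvd_iff_emod_eq_zero]; omega
      rw [hE]
      norm_num [emitA, hI, hD]
    · have hM : PySem.Int.mod (((c : Nat) : Int) - 1) (PySem.Str.len "jkl") = 1 := by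
        rw [show PySem.Str.len "jkl" = ((3 : Nat) : Int) from rfl,
            show ((c : Nat) : Int) - 1 = ((c - 1 : Nat) : Int) from by omega,
            PySem.Int.mod_natCast]
        omega
      have hE : emitB 5 c = "k" := by
        simp only [emitB, pvT5]
        rw [hM]
        decide
      have hI : ((c : Nat) : Int) % 3 = 2 := by omega
      have hD : ¬ (3 : Int) ∣ ((c : Nat) : Int) := by rw [Int.dvd_iff_emod_eq_zero]; omega
      rw [hE]
      norm_num [emitA, hI, hD]
  by_cases hp6 : p = 6
  · subst hp6
    rcases e3 with h | h | h
    · have hM : PySem.Int.mod (((c : Nat) : Int) - 1) (PySem.Str.len "mno") = 2 := by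
        rw [show PySem.Str.len "mno" = ((3 : Nat) : Int) from rfl,
            show ((c : Nat) : Int) - 1 = ((c - 1 : Nat) : Int) from by omega,
            PySem.Int.mod_natCast]
        omega
      have hE : emitB 6 c = "o" := by
        simp only [emitB, pvT6]
        rw [hM]
        decide
      have hI : ((c : Nat) : Int) % 3 = 0 := by omega
      have hD : (3 : Int) ∣ ((c : Nat) : Int) := by rw [Int.dvd_iff_emod_eq_zero]; omega
      rw [hE]
      norm_num [emitA, hI, hD]
    · have hM : PySem.Int.mod (((c : Nat) : Int) - 1) (PySem.Str.len "mno") = 0 := by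
        rw [show PySem.Str.len "mno" = ((3 : Nat) : Int) from rfl,
            show ((c : Nat) : Int) - 1 = ((c - 1 : Nat) : Int) from by omega,
            PySem.Int.mod_natCast]
        omega
      have hE : emitB 6 c = "m" := by
        simp only [emitB, pvT6]
        rw [hM]
        decide
      have hI : ((c : Nat) : Int) % 3 = 1 := by omega
      have hD : ¬ (3 : Int) ∣ ((c : Nat) : Int) := by rw [Int.dvd_iff_emod_eq_zero]; omega
      rw [hE]
      norm_num [emitA, hI, hD]
    · have hM : PySem.Int.mod (((c : Nat) : Int) - 1) (PySem.Str.len "mno") = 1 := by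
        rw [show PySem.Str.len "mno" = ((3 : Nat) : Int) from rfl,
            show ((c : Nat) : Int) - 1 = ((c - 1 : Nat) : Int) from by omega,
            PySem.Int.mod_natCast]
        omega
      have hE : emitB 6 c = "n" := by
        simp only [emitB, pvT6]
        rw [hM]
        decide
      have hI : ((c : Nat) : Int) % 3 = 2 := by omega
      have hD : ¬ (3 : Int) ∣ ((c : Nat) : Int) := by rw [Int.dvd_iff_emod_eq_zero]; omega
      rw [hE]
      norm_num [emitA, hI, hD]
  by_cases hp7 : p = 7
  · subst hp7
    rcases e4 with h | h | h | h
    · have hM : PySem.Int.mod (((c : Nat) : Int) - 1) (PySem.Str.len "pqrs") = 3 := by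
        rw [show PySem.Str.len "pqrs" = ((4 : Nat) : Int) from rfl,
            show ((c : Nat) : Int) - 1 = ((c - 1 : Nat) : Int) from by omega,
            PySem.Int.mod_natCast]
        omega
      have hE : emitB 7 c = "s" := by
        simp only [emitB, pvT7]
        rw [hM]
        decide
      have hI : ((c : Nat) : Int) % 4 = 0 := by omega
      have hD : (4 : Int) ∣ ((c : Nat) : Int) := by rw [Int.dvd_iff_emod_eq_zero]; omega
      rw [hE]
      norm_num [emitA, hI, hD]
    · have hM : PySem.Int.mod (((c : Nat) : Int) - 1) (PySem.Str.len "pqrs") = 0 := by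
        rw [show PySem.Str.len "pqrs" = ((4 : Nat) : Int) from rfl,
            show ((c : Nat) : Int) - 1 = ((c - 1 : Nat) : Int) from by omega,
            PySem.Int.mod_natCast]
        omega
      have hE : emitB 7 c = "p" := by
        simp only [emitB, pvT7]
        rw [hM]
        decide
      have hI : ((c : Nat) : Int) % 4 = 1 := by omega
      have hD : ¬ (4 : Int) ∣ ((c : Nat) : Int) := by rw [Int.dvd_iff_emod_eq_zero]; omega
      rw [hE]
      norm_num [emitA, hI, hD]
    · have hM : PySem.Int.mod (((c : Nat) : Int) - 1) (PySem.Str.len "pqrs") = 1 := by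
        rw [show PySem.Str.len "pqrs" = ((4 : Nat) : Int) from rfl,
            show ((c : Nat) : Int) - 1 = ((c - 1 : Nat) : Int) from by omega,
            PySem.Int.mod_natCast]
        omega
      have hE : emitB 7 c = "q" := by
        simp only [emitB, pvT7]
        rw [hM]
        decide
      have hI : ((c : Nat) : Int) % 4 = 2 := by omega
      have hD : ¬ (4 : Int) ∣ ((c : Nat) : Int) := by rw [Int.dvd_iff_emod_eq_zero]; omega
      rw [hE]
      norm_num [emitA, hI, hD]
    · have hM : PySem.Int.mod (((c : Nat) : Int) - 1) (PySem.Str.len "pqrs") = 2 := by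
        rw [show PySem.Str.len "pqrs" = ((4 : Nat) : Int) from rfl,
            show ((c : Nat) : Int) - 1 = ((c - 1 : Nat) : Int) from by omega,
            PySem.Int.mod_natCast]
        omega
      have hE : emitB 7 c = "r" := by
        simp only [emitB, pvT7]
        rw [hM]
        decide
      have hI : ((c : Nat) : Int) % 4 = 3 := by omega
      have hD : ¬ (4 : Int) ∣ ((c : Nat) : Int) := by rw [Int.dvd_iff_emod_eq_zero]; omega
      rw [hE]
      norm_num [emitA, hI, hD]
  by_cases hp8 : p = 8
  · subst hp8
    rcases e3 with h | h | h
    · have hM : PySem.Int.mod (((c : Nat) : Int) - 1) (PySem.Str.len "tuv") = 2 := by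
        rw [show PySem.Str.len "tuv" = ((3 : Nat) : Int) from rfl,
            show ((c : Nat) : Int) - 1 = ((c - 1 : Nat) : Int) from by omega,
            PySem.Int.mod_natCast]
        omega
      have hE : emitB 8 c = "v" := by
        simp only [emitB, pvT8]
        rw [hM]
        decide
      have hI : ((c : Nat) : Int) % 3 = 0 := by omega
      have hD : (3 : Int) ∣ ((c : Nat) : Int) := by rw [Int.dvd_iff_emod_eq_zero]; omega
      rw [hE]
      norm_num [emitA, hI, hD]
    · have hM : PySem.Int.mod (((c : Nat) : Int) - 1) (PySem.Str.len "tuv") = 0 := by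
        rw [show PySem.Str.len "tuv" = ((3 : Nat) : Int) from rfl,
            show ((c : Nat) : Int) - 1 = ((c - 1 : Nat) : Int) from by omega,
            PySem.Int.mod_natCast]
        omega
      have hE : emitB 8 c = "t" := by
        simp only [emitB, pvT8]
        rw [hM]
        decide
      have hI : ((c : Nat) : Int) % 3 = 1 := by omega
      have hD : ¬ (3 : Int) ∣ ((c : Nat) : Int) := by rw [Int.dvd_iff_emod_eq_zero]; omega
      rw [hE]
      norm_num [emitA, hI, hD]
    · have hM : PySem.Int.mod (((c : Nat) : Int) - 1) (PySem.Str.len "tuv") = 1 := by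
        rw [show PySem.Str.len "tuv" = ((3 : Nat) : Int) from rfl,
            show ((c : Nat) : Int) - 1 = ((c - 1 : Nat) : Int) from by omega,
            PySem.Int.mod_natCast]
        omega
      have hE : emitB 8 c = "u" := by
        simp only [emitB, pvT8]
        rw [hM]
        decide
      have hI : ((c : Nat) : Int) % 3 = 2 := by omega
      have hD : ¬ (3 : Int) ∣ ((c : Nat) : Int) := by rw [Int.dvd_iff_emod_eq_zero]; omega
      rw [hE]
      norm_num [emitA, hI, hD]
  by_cases hp9 : p = 9
  · subst hp9
    rcases e4 with h | h | h | h
    · have hM : PySem.Int.mod (((c : Nat) : Int) - 1) (PySem.Str.len "wxyz") = 3 := by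
        rw [show PySem.Str.len "wxyz" = ((4 : Nat) : Int) from rfl,
            show ((c : Nat) : Int) - 1 = ((c - 1 : Nat) : Int) from by omega,
            PySem.Int.mod_natCast]
        omega
      have hE : emitB 9 c = "z" := by
        simp only [emitB, pvT9]
        rw [hM]
        decide
      have hI : ((c : Nat) : Int) % 4 = 0 := by omega
      have hD : (4 : Int) ∣ ((c : Nat) : Int) := by rw [Int.dvd_iff_emod_eq_zero]; omega
      rw [hE]
      norm_num [emitA, hI, hD]
    · have hM : PySem.Int.mod (((c : Nat) : Int) - 1) (PySem.Str.len "wxyz") = 0 := by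
        rw [show PySem.Str.len "wxyz" = ((4 : Nat) : Int) from rfl,
            show ((c : Nat) : Int) - 1 = ((c - 1 : Nat) : Int) from by omega,
            PySem.Int.mod_natCast]
        omega
      have hE : emitB 9 c = "w" := by
        simp only [emitB, pvT9]
        rw [hM]
        decide
      have hI : ((c : Nat) : Int) % 4 = 1 := by omega
      have hD : ¬ (4 : Int) ∣ ((c : Nat) : Int) := by rw [Int.dvd_iff_emod_eq_zero]; omega
      rw [hE]
      norm_num [emitA, hI, hD]
    · have hM : PySem.Int.mod (((c : Nat) : Int) - 1) (PySem.Str.len "wxyz") = 1 := by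
        rw [show PySem.Str.len "wxyz" = ((4 : Nat) : Int) from rfl,
            show ((c : Nat) : Int) - 1 = ((c - 1 : Nat) : Int) from by omega,
            PySem.Int.mod_natCast]
        omega
      have hE : emitB 9 c = "x" := by
        simp only [emitB, pvT9]
        rw [hM]
        decide
      have hI : ((c : Nat) : Int) % 4 = 2 := by omega
      have hD : ¬ (4 : Int) ∣ ((c : Nat) : Int) := by rw [Int.dvd_iff_emod_eq_zero]; omega
      rw [hE]
      norm_num [emitA, hI, hD]
    · have hM : PySem.Int.mod (((c : Nat) : Int) - 1) (PySem.Str.len "wxyz") = 2 := by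
        rw [show PySem.Str.len "wxyz" = ((4 : Nat) : Int) from rfl,
            show ((c : Nat) : Int) - 1 = ((c - 1 : Nat) : Int) from by omega,
            PySem.Int.mod_natCast]
        omega
      have hE : emitB 9 c = "y" := by
        simp only [emitB, pvT9]
        rw [hM]
        decide
      have hI : ((c : Nat) : Int) % 4 = 3 := by omega
      have hD : ¬ (4 : Int) ∣ ((c : Nat) : Int) := by rw [Int.dvd_iff_emod_eq_zero]; omega
      rw [hE]
      norm_num [emitA, hI, hD]
  by_cases hp0 : p = 0
  · subst hp0
    have hM : PySem.Int.mod (((c : Nat) : Int) - 1) (PySem.Str.len " ") = 0 := by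
      rw [show PySem.Str.len " " = ((1 : Nat) : Int) from rfl,
          show ((c : Nat) : Int) - 1 = ((c - 1 : Nat) : Int) from by omega,
          PySem.Int.mod_natCast]
      omega
    have hE : emitB 0 c = " " := by
      simp only [emitB, pvT0]
      rw [hM]
      decide
    rw [hE]
    norm_num [emitA]
  · have hT := pvT_none p hp0 hp2 hp3 hp4 hp5 hp6 hp7 hp8 hp9
    simp only [emitA, emitB, hT]
    split_ifs <;> rfl

theorem foldA (l : List Int) (msg : String) (p : Int) (c : Nat) (hc : 1 ≤ c) :
    (List.foldl pvStepA (msg, ((c : Nat) : Int), some p) (l ++ [1])).1 = msg ++ pvG p c l := by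
  induction l generalizing msg p c with
  | nil =>
      by_cases hp : p = 1
      · subst hp
        simp [pvStepA, pvG, emitB_one]
      · rw [List.nil_append, List.foldl_cons, stepA_ne msg _ p 1 hp, List.foldl_nil]
        simp [pvG, emitA_eq_emitB p c hc]
  | cons x xs ih =>
      by_cases hx : p = x
      · subst hx
        rw [List.cons_append, List.foldl_cons]
        have hstep : pvStepA (msg, ((c : Nat) : Int), some p) p = (msg, ((c : Nat) : Int) + 1, some p) := by
          simp [pvStepA]
        rw [hstep]
        have hcast : ((c : Nat) : Int) + 1 = (((c + 1 : Nat)) : Int) := by push_cast; ring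
        rw [hcast, ih msg p (c + 1) (by omega)]
        simp [pvG]
      · rw [List.cons_append, List.foldl_cons, stepA_ne msg _ p x hx]
        have ih' := ih (msg ++ emitA p ((c : Nat) : Int)) x 1 (le_refl 1)
        rw [Nat.cast_one] at ih'
        rw [ih', emitA_eq_emitB p c hc]
        have hxp : ¬ x = p := fun h => hx h.symm
        simp [pvG, hxp, String.append_assoc]

-- ---- B-side lemmas ----

-- index? finds a Nodup list's j-th element at j
theorem index?_getElem_nodup (l : List Char) (h : l.Nodup) (j : Nat) (hj : j < l.length) :
    PySem.List.index? l l[j] = some j := by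
  rw [PySem.List.index?_eq_idxOf?, List.idxOf?_eq_some_iff]
  refine ⟨hj, rfl, fun k hk he => ?_⟩
  have := (List.Nodup.getElem_inj_iff h).mp he
  omega

-- Nat arithmetic of the cycling step
theorem mod_succ_cycle (c L : Nat) (hc : 1 ≤ c) (hL : 0 < L) :
    ((c - 1) % L + 1) % L = c % L := by
  conv_rhs => rw [show c = (c - 1) + 1 from by omega]
  rw [Nat.add_mod (c - 1) 1 L]
  rcases Nat.lt_or_ge 1 L with h | h
  · rw [Nat.mod_eq_of_lt h]
  · interval_cases L
    simp

-- cycling the pending letter of a key forward yields the pending letter for a run one longer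
theorem cyc (letters : String) (hnd : letters.toList.Nodup) (hL : 0 < letters.toList.length)
    (c : Nat) (hc : 1 ≤ c) :
    (PySem.Str.pyGet? letters (PySem.Int.mod
        ((((PySem.List.index? letters.toList
              ((PySem.Str.pyGet? letters
                  (PySem.Int.mod ((c : Int) - 1) (PySem.Str.len letters))).getD '?')).getD 0 : Nat) : Int) + 1)
        (PySem.Str.len letters))).getD '?'
      = (PySem.Str.pyGet? letters (PySem.Int.mod (((c + 1 : Nat) : Int) - 1) (PySem.Str.len letters))).getD '?' := by
  set lc := letters.toList with hlc
  have hlen : PySem.Str.len letters = ((lc.length : Nat) : Int) := PySem.Str.len_eq letters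
  have h1 : ((c : Nat) : Int) - 1 = ((c - 1 : Nat) : Int) := by omega
  have hj : (c - 1) % lc.length < lc.length := Nat.mod_lt _ hL
  have hch : (PySem.Str.pyGet? letters (PySem.Int.mod ((c : Int) - 1) (PySem.Str.len letters))).getD '?'
      = lc[(c - 1) % lc.length] := by
    rw [hlen, h1, PySem.Int.mod_natCast, PySem.Str.pyGet?_natCast]
    simp [← hlc, hj]
  rw [hch, index?_getElem_nodup lc hnd _ hj]
  have h2 : ((((c - 1) % lc.length : Nat) : Int)) + 1 = ((((c - 1) % lc.length + 1 : Nat)) : Int) := by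
    push_cast; ring
  have h3 : (((c + 1 : Nat) : Int)) - 1 = ((c : Nat) : Int) := by omega
  rw [hlen, h3]
  simp only [Option.getD_some]
  rw [h2, PySem.Int.mod_natCast, PySem.Int.mod_natCast,
      PySem.Str.pyGet?_natCast, PySem.Str.pyGet?_natCast,
      mod_succ_cycle c lc.length hc hL]

-- B's step starting a run: a key change appends the key's first letter
theorem stepB_ne (out : List Char) (prev : Option Int) (x : Int) (h : ¬ prev = some x) :
    pvStepB (out, prev) x = (out ++ (emitB x 1).toList, some x) := by
  simp only [pvStepB, emitB]
  cases hT : pvTable.get? x with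
  | none => simp
  | some letters =>
      simp only [if_neg h]
      refine congrArg (fun o => (o, some x)) ?_
      have hm : PySem.Int.mod (((1 : Nat) : Int) - 1) (PySem.Str.len letters) = 0 := by
        rw [show (((1 : Nat) : Int) - 1) = ((0 : Nat) : Int) from by norm_num,
            PySem.Str.len_eq letters, PySem.Int.mod_natCast]
        simp
      rw [String.toList_ofList, hm]

-- every value in the table is a Nodup, nonempty letter string
theorem table_val (p : Int) (letters : String) (hT : pvTable.get? p = some letters) :
    letters.toList.Nodup ∧ 0 < letters.toList.length := by
  by_cases h0 : p = 0
  · subst h0; rw [pvT0] at hT; injection hT with h; subst h; exact ⟨by decide, by decide⟩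
  by_cases h2 : p = 2
  · subst h2; rw [pvT2] at hT; injection hT with h; subst h; exact ⟨by decide, by decide⟩
  by_cases h3 : p = 3
  · subst h3; rw [pvT3] at hT; injection hT with h; subst h; exact ⟨by decide, by decide⟩
  by_cases h4 : p = 4
  · subst h4; rw [pvT4] at hT; injection hT with h; subst h; exact ⟨by decide, by decide⟩
  by_cases h5 : p = 5
  · subst h5; rw [pvT5] at hT; injection hT with h; subst h; exact ⟨by decide, by decide⟩
  by_cases h6 : p = 6
  · subst h6; rw [pvT6] at hT; injection hT with h; subst h; exact ⟨by decide, by decide⟩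
  by_cases h7 : p = 7
  · subst h7; rw [pvT7] at hT; injection hT with h; subst h; exact ⟨by decide, by decide⟩
  by_cases h8 : p = 8
  · subst h8; rw [pvT8] at hT; injection hT with h; subst h; exact ⟨by decide, by decide⟩
  by_cases h9 : p = 9
  · subst h9; rw [pvT9] at hT; injection hT with h; subst h; exact ⟨by decide, by decide⟩
  · rw [pvT_none p h0 h2 h3 h4 h5 h6 h7 h8 h9] at hT; cases hT

-- B's step inside a run: cycle the pending letter forward
theorem stepB_eq (out : List Char) (p : Int) (c : Nat) (hc : 1 ≤ c) :
    pvStepB (out ++ (emitB p c).toList, some p) p = (out ++ (emitB p (c + 1)).toList, some p) := by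
  cases hT : pvTable.get? p with
  | none => simp [pvStepB, hT, emitB]
  | some letters =>
      obtain ⟨hnd, hL⟩ := table_val p letters hT
      have hE : ∀ k : Nat, (emitB p k).toList
          = [(PySem.Str.pyGet? letters (PySem.Int.mod ((k : Int) - 1) (PySem.Str.len letters))).getD '?'] := by
        intro k; simp [emitB, hT]
      simp only [pvStepB, hT, hE]
      rw [PySem.List.pyGet?_neg_one_append_singleton]
      simp only [Option.getD_some, List.dropLast_concat]
      rw [cyc letters hnd hL c hc]
      simp

-- B's fold over the rest of the input, given the pending letter of the current run
theorem foldB (l : List Int) (out : List Char) (p : Int) (c : Nat) (hc : 1 ≤ c) :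
    String.ofList ((List.foldl pvStepB (out ++ (emitB p c).toList, some p) l).1)
      = String.ofList out ++ pvG p c l := by
  induction l generalizing out p c with
  | nil => simp [pvG, String.ofList_append, String.ofList_toList]
  | cons x xs ih =>
      by_cases hx : x = p
      · subst hx
        rw [List.foldl_cons, stepB_eq out x c hc, ih out x (c + 1) (by omega)]
        simp [pvG]
      · have hne : ¬ (some p : Option Int) = some x := by
          simp only [Option.some.injEq]; exact fun h => hx h.symm
        rw [List.foldl_cons, stepB_ne (out ++ (emitB p c).toList) (some p) x hne,
            ih (out ++ (emitB p c).toList) x 1 le_rfl]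
        simp [pvG, hx, String.ofList_append, String.ofList_toList, String.append_assoc]

-- ===== VERDICT (by name: the statement is the Claim_ definition above) =====
theorem nums_to_text_spec : Claim_equal_nums_to_text := by
  intro nums _
  unfold Spec_nums_to_text
  have hA : nums_to_text nums = (List.foldl pvStepA ("", 0, none) (nums ++ [1])).1 := rfl
  have hB : nums_to_text_alt nums = String.ofList ((List.foldl pvStepB (([] : List Char), none) (nums ++ [1])).1) := rfl
  rw [hA, hB]
  cases nums with
  | nil =>
      simp [pvStepA, pvStepB, pvT1]
  | cons x rest =>
      rw [List.cons_append, List.foldl_cons, List.foldl_cons]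
      have h0A : pvStepA ("", 0, none) x = ("", 1, some x) := by simp [pvStepA]
      have h0B : pvStepB (([] : List Char), none) x = (([] : List Char) ++ (emitB x 1).toList, some x) :=
        stepB_ne [] none x (by simp)
      rw [h0A, h0B]
      have hfA := foldA rest "" x 1 (le_refl 1)
      rw [Nat.cast_one] at hfA
      rw [hfA, foldB (rest ++ [1]) [] x 1 le_rfl, pvG_append_one]
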